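-- pv_equiv track=rewrite | github.com/yunsaijc/TechManagement | src/services/plagiarism/engine.py | _map_normalized_offset_to_original
-- ===== SOURCE A (Python) =====
-- def _map_normalized_offset_to_original(text: str, normalized_offset: int) -> int:
--     if normalized_offset <= 0:
--         return 0
--
--     count = 0
--     for idx, char in enumerate(text):
--         if char.isspace():
--             continue
--         count += 1
--         if count >= normalized_offset:
--             return idx + 1
--     return len(text)
-- ===== SOURCE B (Python) =====
-- def _map_normalized_offset_to_original(text: str, normalized_offset: int) -> int:
--     if normalized_offset <= 0:
--         return 0
--     prefix = []
--     running = 0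
--     for c in text:
--         if not c.isspace():
--             running += 1
--         prefix.append(running)
--     if not prefix or prefix[-1] < normalized_offset:
--         return len(text)
--     lo, hi = 0, len(prefix) - 1
--     while lo < hi:
--         mid = (lo + hi) // 2
--         if prefix[mid] < normalized_offset:
--             lo = mid + 1
--         else:
--             hi = mid
--     return lo + 1
-- ===== Notes on version B (the rewrite author's own statement) =====
-- stated objective: alternative
-- what changed: Replaced A's count-and-early-exit linear scan with a two-stage algorithm: build a running prefix-sum array of non-whitespace counts, check its last entry to detect overflow, and binary-search the monotone array for the first index reaching the offset.
import Mathlib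
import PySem

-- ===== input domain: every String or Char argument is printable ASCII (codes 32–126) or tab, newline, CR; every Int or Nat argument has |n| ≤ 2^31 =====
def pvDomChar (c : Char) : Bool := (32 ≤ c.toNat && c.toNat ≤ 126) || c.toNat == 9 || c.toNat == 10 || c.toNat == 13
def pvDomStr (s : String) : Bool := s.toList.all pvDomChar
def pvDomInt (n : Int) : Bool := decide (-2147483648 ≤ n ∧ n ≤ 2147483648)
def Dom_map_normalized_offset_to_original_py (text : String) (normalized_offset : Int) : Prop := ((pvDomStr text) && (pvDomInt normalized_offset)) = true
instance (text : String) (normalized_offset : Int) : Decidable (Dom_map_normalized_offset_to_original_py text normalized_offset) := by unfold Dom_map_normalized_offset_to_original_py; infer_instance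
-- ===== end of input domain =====

-- B replaces A's count-and-early-exit scan with a prefix-sum array of non-whitespace
-- counts, an overflow check on its last entry, and a binary search; objective: alternative.


-- ===== PORT A =====
-- A's for-loop over enumerate(text) with early exit, carried as structural recursion
-- over the remaining characters with the running idx and count.
def mapA_loop (cs : List Char) (idx count target total : Int) : Int :=
  match cs with
  | [] => total
  | c :: rest =>
    if PySem.Chars.isspace c then
      mapA_loop rest (idx + 1) count target total
    else
      if count + 1 ≥ target then idx + 1
      else mapA_loop rest (idx + 1) (count + 1) target total

def map_normalized_offset_to_original_py (text : String) (normalized_offset : Int) : Int :=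
  if normalized_offset ≤ 0 then 0
  else mapA_loop text.toList 0 0 normalized_offset (text.toList.length : Int)

-- ===== PORT B =====
-- B's first pass: the running prefix list 'prefix.append(running)'.
def mapB_prefix (cs : List Char) (running : Int) : List Int :=
  match cs with
  | [] => []
  | c :: rest =>
    let r := if PySem.Chars.isspace c then running else running + 1
    r :: mapB_prefix rest r

-- B's while-loop: binary search for the first index with prefix[i] >= target.
def mapB_search (p : List Int) (target lo hi : Int) : Int :=
  if h : lo < hi then
    let mid := PySem.Int.floordiv (lo + hi) 2
    if PySem.List.pyGetD p mid 0 < target then mapB_search p target (mid + 1) hi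
    else mapB_search p target lo mid
  else lo
termination_by (hi - lo).toNat
decreasing_by
  · have h1 := (PySem.Int.floordiv_two_mid_bounds (le_of_lt h)).1
    omega
  · have h2 : PySem.Int.floordiv (lo + hi) 2 < hi :=
      (PySem.Int.floordiv_lt_iff_lt_mul (by norm_num)).mpr (by omega)
    omega

def map_normalized_offset_to_original_py_alt (text : String) (normalized_offset : Int) : Int :=
  if normalized_offset ≤ 0 then 0
  else
    let p := mapB_prefix text.toList 0
    if p = [] ∨ PySem.List.pyGetD p (-1) 0 < normalized_offset then (text.toList.length : Int)
    else mapB_search p normalized_offset 0 ((p.length : Int) - 1) + 1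

-- ===== PRECONDITION & SPEC =====
def Spec_map_normalized_offset_to_original_py (text : String) (normalized_offset : Int) (out : Int) : Prop := out = map_normalized_offset_to_original_py_alt text normalized_offset
instance (text : String) (normalized_offset : Int) (out : Int) : Decidable (Spec_map_normalized_offset_to_original_py text normalized_offset out) := by unfold Spec_map_normalized_offset_to_original_py; infer_instance

-- ===== CLAIM (what is proved, stated in full; the proofs are below) =====
def Claim_equal_map_normalized_offset_to_original_py : Prop := ∀ (text : String) (normalized_offset : Int), Dom_map_normalized_offset_to_original_py text normalized_offset → Spec_map_normalized_offset_to_original_py text normalized_offset (map_normalized_offset_to_original_py text normalized_offset)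

-- ===== LEMMAS AND PROOFS =====

lemma mapB_prefix_length (cs : List Char) (r : Int) : (mapB_prefix cs r).length = cs.length := by
  induction cs generalizing r with
  | nil => rfl
  | cons c rest ih => simp [mapB_prefix, ih]

-- every entry of the prefix list is at least the starting running value
lemma le_of_mem_mapB_prefix (cs : List Char) (r x : Int) (hx : x ∈ mapB_prefix cs r) : r ≤ x := by
  induction cs generalizing r with
  | nil => simp [mapB_prefix] at hx
  | cons c rest ih =>
    simp only [mapB_prefix, List.mem_cons] at hx
    rcases hx with h | h
    · subst h; split_ifs <;> omega
    · have := ih (if PySem.Chars.isspace c then r else r + 1) h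
      split_ifs at this <;> omega

-- the prefix list is monotone nondecreasing
lemma mapB_prefix_mono (cs : List Char) (r : Int) (i j : Nat) (hij : i ≤ j)
    (hj : j < cs.length) :
    (mapB_prefix cs r).getD i 0 ≤ (mapB_prefix cs r).getD j 0 := by
  induction cs generalizing r i j with
  | nil => simp at hj
  | cons c rest ih =>
    cases j with
    | zero =>
      have : i = 0 := by omega
      subst this; exact le_refl _
    | succ j =>
     cases i with
     | zero =>
      simp only [mapB_prefix, List.getD_cons_zero, List.getD_cons_succ]
      have hj' : j < rest.length := by simpa using hj
      rw [List.getD_eq_getElem _ 0 (by rw [mapB_prefix_length]; exact hj')]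
      exact le_of_mem_mapB_prefix _ _ _ (List.getElem_mem _)
     | succ i =>
      simp only [mapB_prefix, List.getD_cons_succ]
      exact ih _ i j (by omega) (by simpa using hj)

-- binary-search correctness on a monotone list: the result is the least index
-- in [lo, hi] whose entry reaches the target
lemma mapB_search_spec (p : List Int) (t : Int)
    (mono : ∀ i j : Nat, i ≤ j → j < p.length → p.getD i 0 ≤ p.getD j 0) :
    ∀ (d : Nat) (lo hi : Int), (hi - lo).toNat ≤ d → 0 ≤ lo → lo ≤ hi →
      hi < (p.length : Int) → t ≤ p.getD hi.toNat 0 →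
      (∀ j : Nat, (j : Int) < lo → p.getD j 0 < t) →
      lo ≤ mapB_search p t lo hi ∧ mapB_search p t lo hi ≤ hi ∧
      t ≤ p.getD (mapB_search p t lo hi).toNat 0 ∧
      (∀ j : Nat, (j : Int) < mapB_search p t lo hi → p.getD j 0 < t) := by
  intro d
  induction d with
  | zero =>
    intro lo hi hfuel h0 hle hlen hhi hlo
    have heq : lo = hi := by omega
    rw [mapB_search]
    simp only [heq, lt_irrefl, dite_false]
    exact ⟨le_refl _, le_refl _, hhi, fun j hj => hlo j (by omega)⟩
  | succ d ih =>
    intro lo hi hfuel h0 hle hlen hhi hlo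
    rw [mapB_search]
    by_cases hlt : lo < hi
    · simp only [hlt, dite_true]
      have hm1 := (PySem.Int.floordiv_two_mid_bounds (le_of_lt hlt)).1
      have hm2 : PySem.Int.floordiv (lo + hi) 2 < hi :=
        (PySem.Int.floordiv_lt_iff_lt_mul (by norm_num)).mpr (by omega)
      set mid := PySem.Int.floordiv (lo + hi) 2 with hmid
      have hmnn : 0 ≤ mid := by omega
      have hget : PySem.List.pyGetD p mid 0 = p.getD mid.toNat 0 :=
        PySem.List.pyGetD_of_nonneg p 0 hmnn
      rw [hget]
      by_cases hc : p.getD mid.toNat 0 < t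
      · simp only [hc, if_true]
        have hlo' : ∀ j : Nat, (j : Int) < mid + 1 → p.getD j 0 < t := by
          intro j hj
          by_cases hjlo : (j : Int) < lo
          · exact hlo j hjlo
          · have hjm : j ≤ mid.toNat := by omega
            exact lt_of_le_of_lt (mono j mid.toNat hjm (by omega)) hc
        exact (ih (mid + 1) hi (by omega) (by omega) (by omega) hlen hhi hlo').imp
          (fun h => by omega) id
      · simp only [hc, if_false]
        have hhm : t ≤ p.getD mid.toNat 0 := by omega
        have := ih lo mid (by omega) h0 (by omega) (by omega) hhm hlo
        exact ⟨this.1, by omega, this.2.2⟩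
    · simp only [hlt, dite_false]
      have heq : lo = hi := by omega
      exact ⟨le_refl _, hle, by rw [heq]; exact hhi, fun j hj => hlo j (by omega)⟩

-- A's loop computed from the prefix list of the not-yet-scanned suffix
lemma mapA_loop_eq (cs : List Char) (idx count target total : Int) (h : count < target) :
    mapA_loop cs idx count target total =
      match (mapB_prefix cs count).findIdx? (fun v => target ≤ v) with
      | some k => idx + k + 1
      | none => total := by
  induction cs generalizing idx count with
  | nil => simp [mapA_loop, mapB_prefix]
  | cons c rest ih =>
    simp only [mapA_loop, mapB_prefix, List.findIdx?_cons]
    by_cases hs : PySem.Chars.isspace c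
    · simp only [hs, if_true]
      have hfail : (decide (target ≤ count)) = false := by simp; omega
      rw [ih (idx + 1) count h]
      simp only [hfail]
      cases (mapB_prefix rest count).findIdx? (fun v => target ≤ v) with
      | none => rfl
      | some k => simp; ring
    · simp only [hs, if_false, Bool.false_eq_true]
      by_cases hdone : count + 1 ≥ target
      · simp only [hdone, if_true]
        norm_num
      · have hfail : (decide (target ≤ count + 1)) = false := by simp; omega
        simp only [hdone, if_false]
        rw [ih (idx + 1) (count + 1) (by omega)]
        cases (mapB_prefix rest (count + 1)).findIdx? (fun v => target ≤ v) with
        | none => rfl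
        | some k => simp; ring

-- ===== VERDICT (by name: the statement is the Claim_ definition above) =====
theorem map_normalized_offset_to_original_py_spec : Claim_equal_map_normalized_offset_to_original_py := by
  intro text n _
  unfold Spec_map_normalized_offset_to_original_py
  unfold map_normalized_offset_to_original_py map_normalized_offset_to_original_py_alt
  by_cases hn : n ≤ 0
  · simp [hn]
  · simp only [hn, if_false]
    set cs := text.toList with hcs
    set p := mapB_prefix cs 0 with hp
    have hlen : p.length = cs.length := mapB_prefix_length cs 0
    rw [mapA_loop_eq cs 0 0 n (cs.length : Int) (by omega)]
    by_cases hnil : cs = []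
    · rw [hp, hnil]; simp [mapB_prefix]
    · have hpne : p ≠ [] := by
        intro hpe; apply hnil
        rw [← List.length_eq_zero_iff, ← hlen, hpe, List.length_nil]
      have hplen : 0 < p.length := List.length_pos_iff.mpr hpne
      have hlast : PySem.List.pyGetD p (-1) 0 = p.getD (p.length - 1) 0 := by
        rw [PySem.List.pyGetD_neg_one p 0 hpne, List.getLast_eq_getElem,
          List.getD_eq_getElem p 0 (by omega)]
      by_cases hover : PySem.List.pyGetD p (-1) 0 < n
      · -- too few non-whitespace characters: both return len(text)
        have hnone : p.findIdx? (fun v => n ≤ v) = none := by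
          rw [List.findIdx?_eq_none_iff]
          intro x hx
          simp only [decide_eq_false_iff_not, not_le]
          obtain ⟨i, hi, hxe⟩ := List.mem_iff_getElem.mp hx
          have : p.getD i 0 ≤ p.getD (p.length - 1) 0 :=
            mapB_prefix_mono cs 0 i (p.length - 1) (by omega) (by omega)
          rw [List.getD_eq_getElem p 0 hi, hxe] at this
          omega
        rw [hnone]
        simp [hover, hpne]
      · -- enough non-whitespace characters: binary search finds A's early-exit index
        have hguard : ¬ (p = [] ∨ PySem.List.pyGetD p (-1) 0 < n) := by
          rw [not_or, not_lt]; exact ⟨hpne, by omega⟩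
        simp only [hguard, if_false]
        have hhi : n ≤ p.getD ((p.length : Int) - 1).toNat 0 := by
          have : ((p.length : Int) - 1).toNat = p.length - 1 := by omega
          rw [this]; rw [hlast] at hover; omega
        obtain ⟨hr1, hr2, hr3, hr4⟩ := mapB_search_spec p n
          (fun i j hij hj => mapB_prefix_mono cs 0 i j hij (hlen ▸ hj)) ((p.length : Int) - 1).toNat 0 ((p.length : Int) - 1)
          (by omega) (le_refl 0) (by omega) (by omega) hhi (by omega)
        -- the search result equals findIdx?'s index
        have hsome : ∃ k, p.findIdx? (fun v => n ≤ v) = some k := by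
          cases hfi : p.findIdx? (fun v => n ≤ v) with
          | some k => exact ⟨k, rfl⟩
          | none =>
            rw [List.findIdx?_eq_none_iff] at hfi
            have hmem : p[p.length - 1] ∈ p := List.getElem_mem (by omega)
            have := hfi _ hmem
            simp only [decide_eq_false_iff_not, not_le] at this
            rw [hlast, List.getD_eq_getElem p 0 (by omega)] at hover
            omega
        obtain ⟨k, hk⟩ := hsome
        rw [hk]
        obtain ⟨hklen, hkp, hkmin⟩ := List.findIdx?_eq_some_iff_getElem.mp hk
        simp only [decide_eq_true_eq] at hkp
        set r := mapB_search p n 0 ((p.length : Int) - 1) with hr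
        have hrk : r = (k : Int) := by
          by_contra hne
          rcases lt_or_gt_of_ne hne with hlt' | hgt
          · -- r < k : entry at r reaches n, contradicting k's minimality
            have hrnat : r.toNat < k := by omega
            have := hkmin r.toNat hrnat
            simp only [decide_eq_true_eq, not_le] at this
            rw [← List.getD_eq_getElem p 0 (by omega)] at this
            omega
          · -- k < r : entries below r are < n, contradicting n ≤ p[k]
            have := hr4 k (by omega)
            rw [List.getD_eq_getElem p 0 hklen] at this
            omega
        rw [hrk]
        push_cast
        ring
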